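-- pv_equiv track=rewrite | github.com/AstronoMoore/vogon | build/lib/vogon/vogon.py | identify_surveys
-- ===== SOURCE A (Python) =====
-- def identify_surveys(TNS_information):
--     reporting_list = TNS_information['internal_names']
--     reporting_list= reporting_list.split(',')
--     survey_dict = {}
--
--     # Iterate over each string in the list
--     for internal_name in reporting_list:
--         if 'ATLAS' in internal_name:
--             survey_dict['ATLAS'] = internal_name.replace(" ", "") # removing the annoying space before the internal name
--         if 'Gaia' in internal_name:
--             survey_dict['Gaia'] = internal_name.replace(" ", "")# removing the annoying space before the internal name
--         if 'ZTF' in internal_name: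
--             survey_dict['ZTF'] = internal_name.replace(" ", "")# removing the annoying space before the internal name
--         if 'PS' in internal_name:
--             survey_dict['PS'] = internal_name.replace(" ", "")# removing the annoying space before the internal name
--         if 'GOTO' in internal_name:
--             survey_dict['GOTO'] = internal_name.replace(" ", "")# removing the annoying space before the internal name
--         if 'BGEM' in internal_name:
--             survey_dict['BGEM'] = internal_name
--     return survey_dict
-- ===== SOURCE B (Python) =====
-- def identify_surveys(TNS_information):
--     names = TNS_information['internal_names'].split(',')
--     surveys = [('ATLAS', True), ('Gaia', True), ('ZTF', True),
--                ('PS', True), ('GOTO', True), ('BGEM', False)]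
--     result = {}
--     for key, strip in surveys:
--         matches = [name for name in names if key in name]
--         if matches:
--             name = matches[-1]
--             result[key] = name.replace(' ', '') if strip else name
--     return result
-- ===== Notes on version B (the rewrite author's own statement) =====
-- stated objective: alternative
-- what changed: Inverts the loop nesting: a survey table drives one scan per survey that picks the last matching internal name, instead of A's single pass through the names with six if-branches updating a dict; Pre_ excludes inputs without an 'internal_names' key (A raises KeyError) and inputs where the surveys' first-match order disagrees with the fixed table order, where the result dict's key order is an insertion-order accident and either order is defensible.
import Mathlib
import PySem

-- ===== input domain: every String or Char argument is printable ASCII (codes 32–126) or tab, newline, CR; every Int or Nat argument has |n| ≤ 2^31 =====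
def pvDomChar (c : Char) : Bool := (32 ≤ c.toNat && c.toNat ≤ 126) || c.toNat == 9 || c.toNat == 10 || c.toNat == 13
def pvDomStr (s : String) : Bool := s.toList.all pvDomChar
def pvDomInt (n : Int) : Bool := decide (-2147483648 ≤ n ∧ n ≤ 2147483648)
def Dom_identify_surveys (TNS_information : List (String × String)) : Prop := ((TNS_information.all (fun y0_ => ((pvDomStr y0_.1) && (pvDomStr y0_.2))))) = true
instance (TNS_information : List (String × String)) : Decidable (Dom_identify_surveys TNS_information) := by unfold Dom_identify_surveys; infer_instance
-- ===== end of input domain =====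

-- B inverts the loop nesting (a survey table drives per-survey scans for the last match); no speed claim.
-- ===== PORT A =====
def pvStepA (d : PySem.Dict String String) (n : String) : PySem.Dict String String :=
  let d := if PySem.Str.isIn "ATLAS" n then d.insert "ATLAS" (PySem.Str.replace n " " "") else d
  let d := if PySem.Str.isIn "Gaia" n then d.insert "Gaia" (PySem.Str.replace n " " "") else d
  let d := if PySem.Str.isIn "ZTF" n then d.insert "ZTF" (PySem.Str.replace n " " "") else d
  let d := if PySem.Str.isIn "PS" n then d.insert "PS" (PySem.Str.replace n " " "") else d
  let d := if PySem.Str.isIn "GOTO" n then d.insert "GOTO" (PySem.Str.replace n " " "") else d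
  let d := if PySem.Str.isIn "BGEM" n then d.insert "BGEM" n else d
  d

def identify_surveys (TNS_information : List (String × String)) : List (String × String) :=
  let reporting_list := ((PySem.Dict.mk TNS_information).get? "internal_names").getD ""
  let reporting_list := (PySem.Str.split? reporting_list ",").getD []
  (reporting_list.foldl pvStepA PySem.Dict.empty).items

-- ===== PORT B =====
def pvTableB : List (String × Bool) :=
  [("ATLAS", true), ("Gaia", true), ("ZTF", true), ("PS", true), ("GOTO", true), ("BGEM", false)]

def pvStepB (names : List String) (d : PySem.Dict String String) (kv : String × Bool) : PySem.Dict String String :=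
  let ms := names.filter (fun n => PySem.Str.isIn kv.1 n)
  if ms.isEmpty then d
  else
    let name := (PySem.List.pyGet? ms (-1)).getD ""
    d.insert kv.1 (if kv.2 then PySem.Str.replace name " " "" else name)

def identify_surveys_alt (TNS_information : List (String × String)) : List (String × String) :=
  let names := (PySem.Str.split? (((PySem.Dict.mk TNS_information).get? "internal_names").getD "") ",").getD []
  (pvTableB.foldl (pvStepB names) PySem.Dict.empty).items

-- ===== PRECONDITION & SPEC =====
def pvNames (TNS_information : List (String × String)) : List String :=
  (PySem.Str.split? (((PySem.Dict.mk TNS_information).get? "internal_names").getD "") ",").getD []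

def pvFirstIdx (names : List String) (k : String) : Nat :=
  names.findIdx (fun n => PySem.Str.isIn k n)

def pvKeysB : List String := ["ATLAS", "Gaia", "ZTF", "PS", "GOTO", "BGEM"]

-- Pre_ excludes (a) inputs without an 'internal_names' key, where the Python A raises KeyError, and
-- (b) inputs where the surveys' first-match order disagrees with the fixed survey order: there the
-- result dict's KEY ORDER is an insertion-order accident (the key/value pairs still agree) and either
-- order is defensible.
def Pre_identify_surveys (TNS_information : List (String × String)) : Prop :=
  "internal_names" ∈ TNS_information.map Prod.fst ∧
  List.Pairwise (fun k1 k2 =>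
      (pvNames TNS_information).any (fun n => PySem.Str.isIn k1 n) = true →
      (pvNames TNS_information).any (fun n => PySem.Str.isIn k2 n) = true →
      pvFirstIdx (pvNames TNS_information) k1 ≤ pvFirstIdx (pvNames TNS_information) k2)
    pvKeysB
instance (TNS_information : List (String × String)) : Decidable (Pre_identify_surveys TNS_information) := by
  unfold Pre_identify_surveys; infer_instance

def pvWitness_identify_surveys : (List (String × String)) := [("internal_names", "ATLAS21abc, ZTF21xyz")]

def Spec_identify_surveys (TNS_information : List (String × String)) (out : List (String × String)) : Prop := out = identify_surveys_alt TNS_information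
instance (TNS_information : List (String × String)) (out : List (String × String)) : Decidable (Spec_identify_surveys TNS_information out) := by unfold Spec_identify_surveys; infer_instance

-- ===== CLAIM (what is proved, stated in full; the proofs are below) =====
def Claim_equal_identify_surveys : Prop := ∀ (TNS_information : List (String × String)), Dom_identify_surveys TNS_information → Pre_identify_surveys TNS_information → Spec_identify_surveys TNS_information (identify_surveys TNS_information)

-- ===== LEMMAS AND PROOFS =====

-- ---- A-side characterisation: items = first-match key order, last-match values ----
def pvValueB (k last : String) : String :=
  if k == "BGEM" then last else PySem.Str.replace last " " ""

def pvInner (n : String) (ks acc : List String) : List String :=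
  ks.foldl (fun acc k => if PySem.Str.isIn k n && !(acc.contains k) then acc ++ [k] else acc) acc

def pvOrder (names : List String) : List String :=
  names.foldl (fun acc n => pvInner n pvKeysB acc) []

def pvValOf (names : List String) (k : String) : String :=
  match names.reverse.find? (fun m => PySem.Str.isIn k m) with
  | some last => pvValueB k last
  | none => ""

lemma pvInner_nodup (n : String) : ∀ (ks acc : List String), acc.Nodup → (pvInner n ks acc).Nodup := by
  intro ks
  induction ks with
  | nil => intro acc h; simpa [pvInner] using h
  | cons k rest ih =>
    intro acc h
    simp only [pvInner, List.foldl_cons]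
    by_cases hc : (PySem.Str.isIn k n && !(acc.contains k)) = true
    · rw [hc]
      apply ih
      simp only [Bool.and_eq_true, Bool.not_eq_true'] at hc
      have hk : k ∉ acc := by simpa using hc.2
      simp [List.nodup_append, h]
      exact fun a ha hak => hk (hak ▸ ha)
    · rw [Bool.not_eq_true] at hc
      rw [hc]
      exact ih acc h

lemma pvInner_mem (n : String) : ∀ (ks acc : List String) (j : String), j ∈ pvInner n ks acc → j ∈ acc ∨ j ∈ ks := by
  intro ks
  induction ks with
  | nil => intro acc j h; exact Or.inl (by simpa [pvInner] using h)
  | cons k rest ih =>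
    intro acc j h
    simp only [pvInner, List.foldl_cons] at h
    by_cases hc : (PySem.Str.isIn k n && !(acc.contains k)) = true
    · rw [hc] at h
      rcases ih _ j h with h' | h'
      · rcases List.mem_append.1 h' with h'' | h''
        · exact Or.inl h''
        · simp at h''; subst h''; simp
      · simp [h']
    · rw [Bool.not_eq_true] at hc; rw [hc] at h
      rcases ih _ j h with h' | h'
      · exact Or.inl h'
      · simp [h']

lemma pvOrder_nodup (names : List String) : (pvOrder names).Nodup := by
  suffices h : ∀ (l acc : List String), acc.Nodup → (l.foldl (fun acc n => pvInner n pvKeysB acc) acc).Nodup by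
    exact h names [] List.nodup_nil
  intro l
  induction l with
  | nil => intro acc h; simpa using h
  | cons n rest ih => intro acc h; exact ih _ (pvInner_nodup n pvKeysB acc h)

lemma pvOrder_mem (names : List String) (j : String) (h : j ∈ pvOrder names) : j ∈ pvKeysB := by
  suffices hg : ∀ (l acc : List String), (∀ x ∈ acc, x ∈ pvKeysB) → j ∈ l.foldl (fun acc n => pvInner n pvKeysB acc) acc → j ∈ pvKeysB by
    exact hg names [] (by simp) h
  intro l
  induction l with
  | nil => intro acc hacc hj; exact hacc j (by simpa using hj)
  | cons n rest ih =>
    intro acc hacc hj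
    refine ih _ ?_ hj
    intro x hx
    rcases pvInner_mem n pvKeysB acc x hx with h' | h'
    · exact hacc x h'
    · exact h'

-- A's per-name step, rewritten as a fold over pvKeysB
lemma pvStepA_eq_fold (d : PySem.Dict String String) (n : String) :
    pvStepA d n = pvKeysB.foldl (fun d k => if PySem.Str.isIn k n then d.insert k (pvValueB k n) else d) d := by
  simp only [pvStepA, pvKeysB, List.foldl_cons, List.foldl_nil, pvValueB,
    show ("ATLAS" == "BGEM") = false from by decide, show ("Gaia" == "BGEM") = false from by decide,
    show ("ZTF" == "BGEM") = false from by decide, show ("PS" == "BGEM") = false from by decide,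
    show ("GOTO" == "BGEM") = false from by decide, show ("BGEM" == "BGEM") = true from by decide,
    Bool.false_eq_true, if_false, if_true]

-- the generic step lemma: one name processed over a key list, on a dict that is a map over an order list
lemma pvStep_items (n : String) : ∀ (ks acc : List String) (g : String → String), acc.Nodup →
    (ks.foldl (fun d k => if PySem.Str.isIn k n then d.insert k (pvValueB k n) else d)
      (PySem.Dict.mk (acc.map (fun j => (j, g j))))).items
    = (pvInner n ks acc).map (fun j => (j, if PySem.Str.isIn j n = true ∧ j ∈ ks then pvValueB j n else g j)) := by
  intro ks
  induction ks with
  | nil =>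
    intro acc g _
    simp [pvInner]
  | cons k rest ih =>
    intro acc g hnd
    simp only [List.foldl_cons, pvInner, List.foldl_cons]
    by_cases hm : PySem.Str.isIn k n = true
    · rw [if_pos hm]
      by_cases hk : k ∈ acc
      · -- overwrite in place
        have hcont : (PySem.Dict.mk (acc.map fun j => (j, g j))).contains k = true := by
          simp [hk]
        have hd : (PySem.Dict.mk (acc.map fun j => (j, g j))).insert k (pvValueB k n)
            = PySem.Dict.mk (acc.map (fun j => (j, if j = k then pvValueB k n else g j))) := by
          apply PySem.Dict.ext
          rw [PySem.Dict.items_insert_of_contains _ _ hcont]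
          show (acc.map fun j => (j, g j)).map (fun p => if p.1 == k then (k, pvValueB k n) else p)
              = acc.map (fun j => (j, if j = k then pvValueB k n else g j))
          rw [List.map_map]
          apply List.map_congr_left
          intro j _
          by_cases hj : j = k <;> simp [hj]
        rw [hd, ih acc _ hnd]
        have hin : (PySem.Str.isIn k n && !(acc.contains k)) = false := by
          simp [hk]
        rw [hin]
        simp only [Bool.false_eq_true, if_false]
        apply List.map_congr_left
        intro j _
        by_cases hjn : PySem.Chars.isIn j.toList n.toList = true
        · by_cases hjr : j ∈ rest
          · simp [hjn, hjr]
          · by_cases hjk : j = k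
            · subst hjk; simp [hjn, hjr]
            · simp [hjn, hjr, hjk]
        · have hjk : j ≠ k := fun h => hjn (by simpa using (h ▸ hm))
          simp [hjn, hjk]
      · -- fresh key appends
        have hcont : (PySem.Dict.mk (acc.map fun j => (j, g j))).contains k = false := by
          simp
          exact fun a ha hak => hk (hak ▸ ha)
        have hd : (PySem.Dict.mk (acc.map fun j => (j, g j))).insert k (pvValueB k n)
            = PySem.Dict.mk ((acc ++ [k]).map (fun j => (j, if j = k then pvValueB k n else g j))) := by
          apply PySem.Dict.ext
          rw [PySem.Dict.items_insert_of_not_contains _ _ hcont]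
          show (acc.map fun j => (j, g j)) ++ [(k, pvValueB k n)]
              = (acc ++ [k]).map (fun j => (j, if j = k then pvValueB k n else g j))
          rw [List.map_append]
          congr 1
          · apply List.map_congr_left
            intro j hj
            have : j ≠ k := fun h => hk (h ▸ hj)
            simp [this]
          · simp
        have hnd' : (acc ++ [k]).Nodup := by
          rw [List.nodup_append]
          refine ⟨hnd, List.nodup_singleton k, ?_⟩
          intro a ha b hb
          simp only [List.mem_singleton] at hb
          subst hb
          exact fun h => hk (h ▸ ha)
        rw [hd, ih (acc ++ [k]) _ hnd']
        have hin : (PySem.Str.isIn k n && !(acc.contains k)) = true := by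
          simp [hk, show PySem.Chars.isIn k.toList n.toList = true from by simpa using hm]
        rw [hin]
        simp only [if_true]
        apply List.map_congr_left
        intro j _
        by_cases hjn : PySem.Chars.isIn j.toList n.toList = true
        · by_cases hjr : j ∈ rest
          · simp [hjn, hjr]
          · by_cases hjk : j = k
            · subst hjk; simp [hjn, hjr]
            · simp [hjn, hjr, hjk]
        · have hjk : j ≠ k := fun h => hjn (by simpa using (h ▸ hm))
          simp [hjn, hjk]
    · rw [if_neg hm]
      have hm' : PySem.Chars.isIn k.toList n.toList = false := by simpa using hm
      have hin : (PySem.Str.isIn k n && !(acc.contains k)) = false := by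
        simp [hm']
      rw [hin]
      simp only [Bool.false_eq_true, if_false]
      rw [ih acc g hnd]
      apply List.map_congr_left
      intro j _
      by_cases hjk : j = k
      · subst hjk; simp [hm']
      · simp [hjk]

lemma pvValOf_append (names : List String) (n j : String) :
    pvValOf (names ++ [n]) j = if PySem.Str.isIn j n = true then pvValueB j n else pvValOf names j := by
  simp only [pvValOf, List.reverse_append, List.reverse_cons, List.reverse_nil, List.nil_append,
    List.cons_append, List.nil_append, List.find?]
  by_cases h : PySem.Chars.isIn j.toList n.toList = true
  · simp [h]
  · simp only [Bool.not_eq_true] at h; simp [h]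

-- the main A-side invariant: A's fold equals a map over the first-match key order
lemma pv_main (names : List String) :
    (names.foldl pvStepA PySem.Dict.empty).items
      = (pvOrder names).map (fun j => (j, pvValOf names j)) := by
  induction names using List.reverseRecOn with
  | nil => simp [pvOrder, pvValOf, PySem.Dict.empty]
  | append_singleton names n ih =>
    rw [List.foldl_append, List.foldl_cons, List.foldl_nil]
    have hd : names.foldl pvStepA PySem.Dict.empty
        = PySem.Dict.mk ((pvOrder names).map (fun j => (j, pvValOf names j))) := by
      apply PySem.Dict.ext
      simpa using ih
    rw [hd, pvStepA_eq_fold]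
    rw [pvStep_items n pvKeysB (pvOrder names) (pvValOf names) (pvOrder_nodup names)]
    have horder : pvOrder (names ++ [n]) = pvInner n pvKeysB (pvOrder names) := by
      simp [pvOrder, List.foldl_append]
    rw [horder]
    apply List.map_congr_left
    intro j hj
    rw [pvValOf_append]
    have hjk : j ∈ pvKeysB := by
      rcases pvInner_mem n pvKeysB (pvOrder names) j hj with h' | h'
      · exact pvOrder_mem names j h'
      · exact h'
    by_cases hjn : PySem.Chars.isIn j.toList n.toList = true
    · simp [hjn, hjk]
    · simp only [Bool.not_eq_true] at hjn; simp [hjn]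

-- ---- B-side characterisation ----
def pvBM (names : List String) (k : String) : Bool :=
  !(names.filter (fun n => PySem.Str.isIn k n)).isEmpty

def pvBVal (names : List String) (kv : String × Bool) : String :=
  if kv.2 then PySem.Str.replace ((PySem.List.pyGet? (names.filter (fun n => PySem.Str.isIn kv.1 n)) (-1)).getD "") " " ""
  else (PySem.List.pyGet? (names.filter (fun n => PySem.Str.isIn kv.1 n)) (-1)).getD ""

lemma pvBM_eq (names : List String) (k : String) :
    pvBM names k = names.any (fun n => PySem.Str.isIn k n) := by
  rw [Bool.eq_iff_iff]
  simp [pvBM, List.filter_eq_nil_iff]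

lemma pvB_items (names : List String) : ∀ (tbl : List (String × Bool)) (acc : List (String × String)),
    (tbl.map Prod.fst).Nodup → (∀ p ∈ acc, p.1 ∉ tbl.map Prod.fst) →
    (tbl.foldl (pvStepB names) (PySem.Dict.mk acc)).items
      = acc ++ (tbl.filter (fun kv => pvBM names kv.1)).map (fun kv => (kv.1, pvBVal names kv)) := by
  intro tbl
  induction tbl with
  | nil => intro acc _ _; simp
  | cons kv rest ih =>
    intro acc hnd hdisj
    simp only [List.map_cons, List.nodup_cons] at hnd
    simp only [List.foldl_cons, pvStepB]
    by_cases he : (names.filter (fun n => PySem.Str.isIn kv.1 n)).isEmpty = true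
    · rw [if_pos he]
      have hbm : pvBM names kv.1 = false := by unfold pvBM; rw [he]; rfl
      rw [List.filter_cons]
      rw [hbm]
      simp only [Bool.false_eq_true, if_false]
      exact ih acc hnd.2 (fun p hp => fun hm => hdisj p hp (by simp [hm]))
    · rw [if_neg he]
      rw [Bool.not_eq_true] at he
      have hbm : pvBM names kv.1 = true := by unfold pvBM; rw [he]; rfl
      have hcont : (PySem.Dict.mk acc).contains kv.1 = false := by
        simp
        exact fun a b hab => fun h => hdisj (a, b) hab (by simp [h])
      have hd : (PySem.Dict.mk acc).insert kv.1
            (if kv.2 then PySem.Str.replace ((PySem.List.pyGet? (names.filter (fun n => PySem.Str.isIn kv.1 n)) (-1)).getD "") " " ""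
             else (PySem.List.pyGet? (names.filter (fun n => PySem.Str.isIn kv.1 n)) (-1)).getD "")
          = PySem.Dict.mk (acc ++ [(kv.1, pvBVal names kv)]) := by
        apply PySem.Dict.ext
        rw [PySem.Dict.items_insert_of_not_contains _ _ hcont]
        rfl
      rw [hd]
      rw [ih (acc ++ [(kv.1, pvBVal names kv)]) hnd.2 ?_]
      · rw [List.filter_cons, hbm]
        simp
      · intro p hp
        rcases List.mem_append.1 hp with h' | h'
        · exact fun hm => hdisj p h' (by simp [hm])
        · rw [List.mem_singleton] at h'
          rw [h']
          exact hnd.1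

lemma pvB_main (names : List String) :
    (pvTableB.foldl (pvStepB names) PySem.Dict.empty).items
      = (pvKeysB.filter (pvBM names)).map
          (fun k => (k, pvValueB k ((PySem.List.pyGet? (names.filter (fun n => PySem.Str.isIn k n)) (-1)).getD ""))) := by
  have h0 : (PySem.Dict.empty : PySem.Dict String String) = PySem.Dict.mk [] := rfl
  rw [h0, pvB_items names pvTableB [] (by decide) (by simp)]
  rw [List.nil_append]
  have hkeys : pvKeysB = pvTableB.map Prod.fst := by decide
  rw [hkeys, List.filter_map, List.map_map]
  apply List.map_congr_left
  intro kv hkv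
  simp only [List.mem_filter, pvTableB, List.mem_cons] at hkv
  rcases hkv with ⟨hkv, -⟩
  rcases hkv with rfl | rfl | rfl | rfl | rfl | rfl | h
  · simp [pvBVal, pvValueB]
  · simp [pvBVal, pvValueB]
  · simp [pvBVal, pvValueB]
  · simp [pvBVal, pvValueB]
  · simp [pvBVal, pvValueB]
  · simp [pvBVal, pvValueB]
  · simp at h

-- ---- the key-order argument ----
def pvR (names : List String) (k1 k2 : String) : Prop :=
  pvFirstIdx names k1 < pvFirstIdx names k2 ∨
  (pvFirstIdx names k1 = pvFirstIdx names k2 ∧ pvKeysB.idxOf k1 < pvKeysB.idxOf k2)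

lemma pvInner_spec (n : String) : ∀ (ks acc : List String), ks.Nodup →
    pvInner n ks acc = acc ++ ks.filter (fun k => PySem.Str.isIn k n && !(acc.contains k)) := by
  intro ks
  induction ks with
  | nil => intro acc _; simp [pvInner]
  | cons k rest ih =>
    intro acc hnd
    rw [List.nodup_cons] at hnd
    simp only [pvInner, List.foldl_cons]
    by_cases hc : (PySem.Str.isIn k n && !(acc.contains k)) = true
    · rw [hc]
      show pvInner n rest (acc ++ [k]) = _
      rw [ih (acc ++ [k]) hnd.2]
      have hfr : List.filter (fun x => PySem.Str.isIn x n && !((acc ++ [k]).contains x)) rest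
          = List.filter (fun x => PySem.Str.isIn x n && !(acc.contains x)) rest := by
        apply List.filter_congr
        intro x hx
        have hxk : x ≠ k := fun h => hnd.1 (h ▸ hx)
        simp [hxk]
      rw [hfr, List.filter_cons, hc, List.append_assoc]
      rfl
    · rw [Bool.not_eq_true] at hc
      rw [hc]
      show pvInner n rest acc = _
      rw [ih acc hnd.2, List.filter_cons, hc]
      simp only [Bool.false_eq_true, if_false]

lemma pvKeysB_nodup : pvKeysB.Nodup := by decide

lemma pvOrder_snoc (names : List String) (n : String) :
    pvOrder (names ++ [n]) = pvOrder names ++ pvKeysB.filter (fun k => PySem.Str.isIn k n && !((pvOrder names).contains k)) := by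
  show (names ++ [n]).foldl (fun acc n => pvInner n pvKeysB acc) [] = _
  rw [List.foldl_append, List.foldl_cons, List.foldl_nil]
  exact pvInner_spec n pvKeysB (pvOrder names) pvKeysB_nodup

lemma pvOrder_mem_iff (names : List String) (k : String) :
    k ∈ pvOrder names ↔ k ∈ pvKeysB ∧ names.any (fun n => PySem.Str.isIn k n) = true := by
  induction names using List.reverseRecOn with
  | nil => simp [pvOrder]
  | append_singleton l a ih =>
    rw [pvOrder_snoc, List.mem_append, List.mem_filter, ih,
      List.any_append, List.any_cons, List.any_nil, Bool.or_false, Bool.or_eq_true]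
    constructor
    · rintro (⟨h1, h2⟩ | ⟨h1, h2⟩)
      · exact ⟨h1, Or.inl h2⟩
      · rw [Bool.and_eq_true] at h2
        exact ⟨h1, Or.inr h2.1⟩
    · rintro ⟨h1, h2 | h2⟩
      · exact Or.inl ⟨h1, h2⟩
      · by_cases hm : l.any (fun n => PySem.Str.isIn k n) = true
        · exact Or.inl ⟨h1, hm⟩
        · right
          refine ⟨h1, ?_⟩
          rw [Bool.and_eq_true]
          refine ⟨h2, ?_⟩
          have hknot : k ∉ pvOrder l := fun hmem => hm (ih.1 hmem).2
          cases hcc : (pvOrder l).contains k with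
          | false => rfl
          | true => exact absurd (List.contains_iff_mem.1 hcc) hknot

lemma pvFirstIdx_snoc_matched (names : List String) (n k : String)
    (h : names.any (fun m => PySem.Str.isIn k m) = true) :
    pvFirstIdx (names ++ [n]) k = pvFirstIdx names k := by
  unfold pvFirstIdx
  rw [List.findIdx_append, if_pos]
  rw [List.findIdx_lt_length, ← List.any_eq_true]
  exact h

lemma pvFirstIdx_lt (names : List String) (k : String)
    (h : names.any (fun m => PySem.Str.isIn k m) = true) :
    pvFirstIdx names k < names.length := by
  unfold pvFirstIdx
  rw [List.findIdx_lt_length, ← List.any_eq_true]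
  exact h

lemma pvFirstIdx_snoc_new (names : List String) (n k : String)
    (h : names.any (fun m => PySem.Str.isIn k m) = false) (h2 : PySem.Str.isIn k n = true) :
    pvFirstIdx (names ++ [n]) k = names.length := by
  unfold pvFirstIdx
  rw [List.findIdx_append, if_neg]
  · rw [List.findIdx_cons, h2]
    simp
  · rw [List.findIdx_lt_length, ← List.any_eq_true]
    simp [h]

lemma pvKeysB_idx_pairwise : List.Pairwise (fun a b => pvKeysB.idxOf a < pvKeysB.idxOf b) pvKeysB := by
  decide

lemma pvNew_not_any (l : List String) (y : String)
    (hy1 : y ∈ pvKeysB) (hnc : (!(pvOrder l).contains y) = true) :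
    l.any (fun m => PySem.Str.isIn y m) = false := by
  cases hany : l.any (fun m => PySem.Str.isIn y m) with
  | false => rfl
  | true =>
    have hmem : y ∈ pvOrder l := (pvOrder_mem_iff l y).2 ⟨hy1, hany⟩
    rw [Bool.not_eq_true'] at hnc
    exact absurd (List.contains_iff_mem.2 hmem) (by rw [hnc]; exact Bool.false_ne_true)

lemma pvOrder_pairwise (names : List String) : List.Pairwise (pvR names) (pvOrder names) := by
  induction names using List.reverseRecOn with
  | nil => simp [pvOrder]
  | append_singleton l a ih =>
    rw [pvOrder_snoc, List.pairwise_append]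
    refine ⟨?_, ?_, ?_⟩
    · refine ih.imp_of_mem ?_
      intro x y hx hy hr
      have hxm := (pvOrder_mem_iff l x).1 hx
      have hym := (pvOrder_mem_iff l y).1 hy
      unfold pvR at hr ⊢
      rw [pvFirstIdx_snoc_matched l a x hxm.2, pvFirstIdx_snoc_matched l a y hym.2]
      exact hr
    · refine (pvKeysB_idx_pairwise.filter _).imp_of_mem ?_
      intro x y hx hy hr
      rw [List.mem_filter] at hx hy
      have hx2 := hx.2
      have hy2 := hy.2
      rw [Bool.and_eq_true] at hx2 hy2
      have hxnew := pvNew_not_any l x hx.1 hx2.2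
      have hynew := pvNew_not_any l y hy.1 hy2.2
      unfold pvR
      rw [pvFirstIdx_snoc_new l a x hxnew hx2.1, pvFirstIdx_snoc_new l a y hynew hy2.1]
      exact Or.inr ⟨rfl, hr⟩
    · intro x hx y hy
      have hxm := (pvOrder_mem_iff l x).1 hx
      rw [List.mem_filter] at hy
      have hy2 := hy.2
      rw [Bool.and_eq_true] at hy2
      have hynew := pvNew_not_any l y hy.1 hy2.2
      unfold pvR
      left
      rw [pvFirstIdx_snoc_matched l a x hxm.2, pvFirstIdx_snoc_new l a y hynew hy2.1]
      exact pvFirstIdx_lt l x hxm.2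

lemma pvOrder_eq (names : List String)
    (hmono : List.Pairwise (fun k1 k2 =>
        names.any (fun n => PySem.Str.isIn k1 n) = true →
        names.any (fun n => PySem.Str.isIn k2 n) = true →
        pvFirstIdx names k1 ≤ pvFirstIdx names k2) pvKeysB) :
    pvOrder names = pvKeysB.filter (fun k => names.any (fun n => PySem.Str.isIn k n)) := by
  have hfp : List.Pairwise (pvR names) (pvKeysB.filter (fun k => names.any (fun n => PySem.Str.isIn k n))) := by
    refine ((hmono.and pvKeysB_idx_pairwise).filter _).imp_of_mem ?_
    intro x y hx hy hr
    rw [List.mem_filter] at hx hy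
    have hle := hr.1 hx.2 hy.2
    unfold pvR
    rcases Nat.lt_or_ge (pvFirstIdx names x) (pvFirstIdx names y) with h | h
    · exact Or.inl h
    · exact Or.inr ⟨Nat.le_antisymm hle h, hr.2⟩
  have hperm : (pvOrder names).Perm (pvKeysB.filter (fun k => names.any (fun n => PySem.Str.isIn k n))) := by
    rw [List.perm_ext_iff_of_nodup (pvOrder_nodup names) (pvKeysB_nodup.filter _)]
    intro a
    rw [pvOrder_mem_iff, List.mem_filter]
  refine List.Perm.eq_of_pairwise ?_ (pvOrder_pairwise names) hfp hperm
  intro a b _ _ h1 h2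
  exact False.elim (by
    unfold pvR at h1 h2
    rcases h1 with h | ⟨e, h⟩ <;> rcases h2 with h' | ⟨e', h'⟩ <;> omega)

-- ---- values: last-match agreement ----
lemma pv_find_rev (l : List String) (p : String → Bool) :
    l.reverse.find? p = (l.filter p).getLast? := by
  induction l using List.reverseRecOn with
  | nil => rfl
  | append_singleton l a ih =>
    rw [show (l ++ [a]).reverse = a :: l.reverse by simp]
    rw [List.find?_cons, List.filter_append, List.getLast?_append]
    cases hpa : p a with
    | true =>
      have hf : List.filter p [a] = [a] := by simp [hpa]
      rw [hf]
      rfl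
    | false =>
      have hf : List.filter p [a] = ([] : List String) := by simp [hpa]
      rw [hf, ih]
      rfl

lemma pv_pyGet_last (l : List String) (h : l ≠ []) :
    PySem.List.pyGet? l (-1) = l.getLast? := by
  have hlen : 1 ≤ l.length := List.length_pos_of_ne_nil h
  have h1 : PySem.List.pyIdx? l.length (-1) = some (l.length - 1) := by
    unfold PySem.List.pyIdx?
    rw [if_neg (by norm_num), if_pos (by omega)]
    norm_num
  unfold PySem.List.pyGet?
  rw [h1, List.getLast?_eq_getElem?]
  rfl

lemma pv_val_eq (names : List String) (k : String)
    (h : names.any (fun n => PySem.Str.isIn k n) = true) :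
    pvValOf names k = pvValueB k ((PySem.List.pyGet? (names.filter (fun n => PySem.Str.isIn k n)) (-1)).getD "") := by
  have hne : names.filter (fun n => PySem.Str.isIn k n) ≠ [] := by
    rcases List.any_eq_true.1 h with ⟨x, hx, hpx⟩
    exact List.ne_nil_of_mem (List.mem_filter.2 ⟨hx, hpx⟩)
  rw [pv_pyGet_last _ hne]
  unfold pvValOf
  rw [pv_find_rev]
  obtain ⟨last, hlast⟩ : ∃ last, (names.filter (fun n => PySem.Str.isIn k n)).getLast? = some last := by
    cases hg : (names.filter (fun n => PySem.Str.isIn k n)).getLast? with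
    | none => exact absurd (List.getLast?_eq_none_iff.1 hg) hne
    | some v => exact ⟨v, rfl⟩
  rw [hlast]
  rfl

-- ===== VERDICT (by name: the statement is the Claim_ definition above) =====
theorem identify_surveys_spec : Claim_equal_identify_surveys := by
  intro t _ pre
  obtain ⟨-, hmono⟩ := pre
  show identify_surveys t = identify_surveys_alt t
  simp only [identify_surveys, identify_surveys_alt]
  rw [pv_main, pvB_main]
  unfold pvNames at hmono
  rw [List.filter_congr (fun k _ => pvBM_eq _ k)]
  rw [← pvOrder_eq _ hmono]
  apply List.map_congr_left
  intro k hk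
  have hm := ((pvOrder_mem_iff _ k).1 hk).2
  rw [pv_val_eq _ k hm]
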